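-- pv_equiv track=rewrite | github.com/simoji-dev/simojio | simoji/lib/BasicFunctions.py | remove_exclude_values_from_list
-- ===== SOURCE A (Python) =====
-- def remove_exclude_values_from_list(total_value_list: list, exclude_tuple_list: list) -> list:
--     """
--     From a given total_value_list, remove all values that are within the bounds given in the exclude_tuple_list, e.g.:
--     total_value_list = [1,2,3,4,5,6,7,8,9,10]
--     exclude_tuple_list = [(0,3), (7,8)]
--     -> remaining_values_list = [4,5,6,9,10]
--
--     :param total_value_list:
--     :param exclude_tuple_list:
--     :return: remaining_values_list
--     """
--
--     def is_in_exclude_tuples(check_value: float) -> bool: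
--         is_in_tuple_bool = False
--         for bound_tuple in exclude_tuple_list:
--             if (check_value >= min(bound_tuple)) and (check_value <= max(bound_tuple)):
--                 is_in_tuple_bool = True
--                 break
--         return is_in_tuple_bool
--
--     remaining_values_list = []
--     for value in total_value_list:
--         if not is_in_exclude_tuples(value):
--             remaining_values_list.append(value)
--
--     return remaining_values_list
-- ===== SOURCE B (Python) =====
-- def remove_exclude_values_from_list(total_value_list: list, exclude_tuple_list: list) -> list:
--     # Normalize each tuple to (low, high) and sort by low, then merge overlapping
--     # intervals once; each value is then checked against the merged, low-sorted
--     # intervals with early exit as soon as an interval starts above the value.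
--     normalized = sorted(((min(t), max(t)) for t in exclude_tuple_list), key=lambda t: t[0])
--     merged = _merge_sorted_intervals(normalized)
--
--     def covered(x):
--         for lo, hi in merged:
--             if lo > x:
--                 return False
--             if x <= hi:
--                 return True
--         return False
--
--     return [v for v in total_value_list if not covered(v)]
--
--
-- def _merge_sorted_intervals(sorted_intervals):
--     if not sorted_intervals:
--         return []
--     (cur_lo, cur_hi), rest = sorted_intervals[0], sorted_intervals[1:]
--     out = []
--     for lo, hi in rest:
--         if lo <= cur_hi:
--             if hi > cur_hi:
--                 cur_hi = hi
--         else: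
--             out.append((cur_lo, cur_hi))
--             cur_lo, cur_hi = lo, hi
--     out.append((cur_lo, cur_hi))
--     return out
-- ===== Notes on version B (the rewrite author's own statement) =====
-- stated objective: faster
-- what changed: Instead of scanning every exclude tuple for every value, B normalizes and sorts the intervals once, merges overlapping ones into a disjoint sorted list, and checks each value against the merged list with an early exit once an interval starts above the value.
import Mathlib
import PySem

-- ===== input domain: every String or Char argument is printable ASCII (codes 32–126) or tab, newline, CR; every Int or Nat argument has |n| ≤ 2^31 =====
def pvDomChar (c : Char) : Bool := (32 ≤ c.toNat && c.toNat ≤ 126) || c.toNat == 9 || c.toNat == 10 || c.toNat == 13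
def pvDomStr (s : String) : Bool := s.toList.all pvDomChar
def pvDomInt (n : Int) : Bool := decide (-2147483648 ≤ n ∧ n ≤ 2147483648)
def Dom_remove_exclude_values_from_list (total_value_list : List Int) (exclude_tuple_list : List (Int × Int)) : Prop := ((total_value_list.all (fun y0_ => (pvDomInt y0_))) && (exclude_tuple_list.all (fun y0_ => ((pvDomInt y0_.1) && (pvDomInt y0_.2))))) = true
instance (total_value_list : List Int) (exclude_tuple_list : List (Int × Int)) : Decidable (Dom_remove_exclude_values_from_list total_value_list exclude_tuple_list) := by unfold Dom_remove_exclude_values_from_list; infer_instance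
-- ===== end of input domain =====

-- B replaces A's per-value scan of all exclude tuples by a one-time sort+merge of the
-- intervals followed by an early-exit check per value (objective: faster on many intervals).

-- ===== PORT A =====
-- inner helper `is_in_exclude_tuples`: scan the tuples, break on first hit
def pvIsInExcludeTuples (exclude_tuple_list : List (Int × Int)) (check_value : Int) : Bool :=
  match exclude_tuple_list with
  | [] => false
  | t :: rest =>
    if check_value ≥ min t.1 t.2 ∧ check_value ≤ max t.1 t.2 then true
    else pvIsInExcludeTuples rest check_value

def remove_exclude_values_from_list (total_value_list : List Int) (exclude_tuple_list : List (Int × Int)) : List Int :=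
  total_value_list.foldl
    (fun remaining_values_list value =>
      if !(pvIsInExcludeTuples exclude_tuple_list value) then remaining_values_list ++ [value]
      else remaining_values_list)
    []

-- ===== PORT B =====
-- `_merge_sorted_intervals` loop over `rest`, carrying the current interval
def pvMergeGo (cur_lo cur_hi : Int) : List (Int × Int) → List (Int × Int)
  | [] => [(cur_lo, cur_hi)]
  | (lo, hi) :: rest =>
    if lo ≤ cur_hi then pvMergeGo cur_lo (if hi > cur_hi then hi else cur_hi) rest
    else (cur_lo, cur_hi) :: pvMergeGo lo hi rest

def pvMergeSortedIntervals (sorted_intervals : List (Int × Int)) : List (Int × Int) :=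
  match sorted_intervals with
  | [] => []
  | (lo, hi) :: rest => pvMergeGo lo hi rest

-- inner helper `covered`: scan merged intervals, early exit once lo > x
def pvCovered (merged : List (Int × Int)) (x : Int) : Bool :=
  match merged with
  | [] => false
  | (lo, hi) :: rest =>
    if lo > x then false
    else if x ≤ hi then true
    else pvCovered rest x

def remove_exclude_values_from_list_alt (total_value_list : List Int) (exclude_tuple_list : List (Int × Int)) : List Int :=
  let normalized := PySem.List.sorted (exclude_tuple_list.map (fun t => (min t.1 t.2, max t.1 t.2))) (fun t => t.1) false
  let merged := pvMergeSortedIntervals normalized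
  total_value_list.filter (fun v => !(pvCovered merged v))

-- ===== PRECONDITION & SPEC =====
def Spec_remove_exclude_values_from_list (total_value_list : List Int) (exclude_tuple_list : List (Int × Int)) (out : List Int) : Prop := out = remove_exclude_values_from_list_alt total_value_list exclude_tuple_list
instance (total_value_list : List Int) (exclude_tuple_list : List (Int × Int)) (out : List Int) : Decidable (Spec_remove_exclude_values_from_list total_value_list exclude_tuple_list out) := by unfold Spec_remove_exclude_values_from_list; infer_instance

-- ===== CLAIM (what is proved, stated in full; the proofs are below) =====
def Claim_equal_remove_exclude_values_from_list : Prop := ∀ (total_value_list : List Int) (exclude_tuple_list : List (Int × Int)), Dom_remove_exclude_values_from_list total_value_list exclude_tuple_list → Spec_remove_exclude_values_from_list total_value_list exclude_tuple_list (remove_exclude_values_from_list total_value_list exclude_tuple_list)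

-- ===== LEMMAS AND PROOFS =====

-- "x lies in some interval of l" (intervals taken as (low, high))
def pvCovers (l : List (Int × Int)) (x : Int) : Prop := ∃ p ∈ l, p.1 ≤ x ∧ x ≤ p.2

theorem pvIsIn_iff (ex : List (Int × Int)) (v : Int) :
    pvIsInExcludeTuples ex v = true ↔ pvCovers (ex.map (fun t => (min t.1 t.2, max t.1 t.2))) v := by
  induction ex with
  | nil => simp [pvIsInExcludeTuples, pvCovers]
  | cons t rest ih =>
    simp only [pvIsInExcludeTuples, pvCovers, List.map_cons, List.mem_cons]
    constructor
    · intro h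
      split_ifs at h with hc
      · exact ⟨_, Or.inl rfl, hc.1, hc.2⟩
      · obtain ⟨p, hp, h1, h2⟩ := (ih).1 h
        exact ⟨p, Or.inr hp, h1, h2⟩
    · rintro ⟨p, hp | hp, h1, h2⟩
      · subst hp; simp only [ge_iff_le] at *
        rw [if_pos ⟨h1, h2⟩]
      · split_ifs with hc
        · rfl
        · exact ih.2 ⟨p, hp, h1, h2⟩

theorem pvCovered_iff (ms : List (Int × Int)) (x : Int)
    (hs : ms.Pairwise (fun a b => a.1 ≤ b.1)) :
    pvCovered ms x = true ↔ pvCovers ms x := by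
  induction ms with
  | nil => simp [pvCovered, pvCovers]
  | cons p rest ih =>
    obtain ⟨lo, hi⟩ := p
    rw [List.pairwise_cons] at hs
    simp only [pvCovered, pvCovers, List.mem_cons]
    split_ifs with h1 h2
    · constructor
      · intro h; cases h
      · rintro ⟨q, hq | hq, ha, hb⟩
        · subst hq; omega
        · have := hs.1 q hq; simp at this; omega
    · constructor
      · intro _; exact ⟨(lo, hi), Or.inl rfl, by omega, h2⟩
      · intro _; rfl
    · rw [ih hs.2]
      constructor
      · rintro ⟨q, hq, ha, hb⟩; exact ⟨q, Or.inr hq, ha, hb⟩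
      · rintro ⟨q, hq | hq, ha, hb⟩
        · subst hq; simp at ha hb; omega
        · exact ⟨q, hq, ha, hb⟩

theorem pvMergeGo_props (rest : List (Int × Int)) :
    ∀ (cl ch : Int), rest.Pairwise (fun a b => a.1 ≤ b.1) → (∀ p ∈ rest, cl ≤ p.1) →
      ((pvMergeGo cl ch rest).Pairwise (fun a b => a.1 ≤ b.1)
        ∧ (∀ p ∈ pvMergeGo cl ch rest, cl ≤ p.1)
        ∧ ∀ x : Int, (pvCovers (pvMergeGo cl ch rest) x ↔ (cl ≤ x ∧ x ≤ ch) ∨ pvCovers rest x)) := by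
  induction rest with
  | nil =>
    intro cl ch _ _
    refine ⟨by simp [pvMergeGo], ?_, fun x => by simp [pvMergeGo, pvCovers]⟩
    intro p hp
    simp only [pvMergeGo, List.mem_singleton] at hp
    subst hp; rfl
  | cons p rest ih =>
    intro cl ch hp hlb
    obtain ⟨lo, hi⟩ := p
    rw [List.pairwise_cons] at hp
    have hcl_lo : cl ≤ lo := hlb (lo, hi) (List.mem_cons_self)
    by_cases hle : lo ≤ ch
    · -- overlapping: extend cur_hi
      have hstep : pvMergeGo cl ch ((lo, hi) :: rest) = pvMergeGo cl (max ch hi) rest := by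
        simp only [pvMergeGo, if_pos hle]
        congr 1
        split_ifs <;> omega
      rw [hstep]
      have hrec := ih cl (max ch hi) hp.2
        (fun q hq => le_trans hcl_lo (by simpa using hp.1 q hq))
      refine ⟨hrec.1, hrec.2.1, fun x => ?_⟩
      rw [hrec.2.2 x]
      simp only [pvCovers, List.mem_cons]
      constructor
      · rintro (⟨h1, h2⟩ | ⟨q, hq, ha, hb⟩)
        · by_cases hch : x ≤ ch
          · exact Or.inl ⟨h1, hch⟩
          · exact Or.inr ⟨(lo, hi), Or.inl rfl, by simp; omega, by simp; omega⟩
        · exact Or.inr ⟨q, Or.inr hq, ha, hb⟩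
      · rintro (⟨h1, h2⟩ | ⟨q, hq | hq, ha, hb⟩)
        · exact Or.inl ⟨h1, by omega⟩
        · subst hq; simp at ha hb; exact Or.inl ⟨by omega, by omega⟩
        · exact Or.inr ⟨q, hq, ha, hb⟩
    · -- disjoint: emit current interval, restart from (lo, hi)
      have hstep : pvMergeGo cl ch ((lo, hi) :: rest)
          = (cl, ch) :: pvMergeGo lo hi rest := by
        simp only [pvMergeGo, if_neg hle]
      rw [hstep]
      have hrec := ih lo hi hp.2 (fun q hq => by simpa using hp.1 q hq)
      refine ⟨?_, ?_, fun x => ?_⟩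
      · rw [List.pairwise_cons]
        exact ⟨fun q hq => le_trans hcl_lo (hrec.2.1 q hq), hrec.1⟩
      · intro q hq
        rcases List.mem_cons.1 hq with h | h
        · subst h; rfl
        · exact le_trans hcl_lo (hrec.2.1 q h)
      · simp only [pvCovers, List.mem_cons]
        constructor
        · rintro ⟨q, hq | hq, ha, hb⟩
          · subst hq; exact Or.inl ⟨ha, hb⟩
          · rcases (hrec.2.2 x).1 ⟨q, hq, ha, hb⟩ with ⟨h1, h2⟩ | ⟨r, hr, hc, hd⟩
            · exact Or.inr ⟨(lo, hi), Or.inl rfl, by simpa using h1, by simpa using h2⟩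
            · exact Or.inr ⟨r, Or.inr hr, hc, hd⟩
        · rintro (⟨h1, h2⟩ | ⟨q, hq | hq, ha, hb⟩)
          · exact ⟨(cl, ch), Or.inl rfl, h1, h2⟩
          · subst hq; simp at ha hb
            obtain ⟨r, hr, hc, hd⟩ := (hrec.2.2 x).2 (Or.inl ⟨ha, hb⟩)
            exact ⟨r, Or.inr hr, hc, hd⟩
          · obtain ⟨r, hr, hc, hd⟩ := (hrec.2.2 x).2 (Or.inr ⟨q, hq, ha, hb⟩)
            exact ⟨r, Or.inr hr, hc, hd⟩

theorem pvMerge_props (l : List (Int × Int)) (hs : l.Pairwise (fun a b => a.1 ≤ b.1)) :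
    (pvMergeSortedIntervals l).Pairwise (fun a b => a.1 ≤ b.1)
      ∧ ∀ x : Int, (pvCovers (pvMergeSortedIntervals l) x ↔ pvCovers l x) := by
  cases l with
  | nil => exact ⟨by simp [pvMergeSortedIntervals], fun x => Iff.rfl⟩
  | cons p rest =>
    obtain ⟨lo, hi⟩ := p
    rw [List.pairwise_cons] at hs
    have h := pvMergeGo_props rest lo hi hs.2 (fun q hq => by simpa using hs.1 q hq)
    refine ⟨h.1, fun x => ?_⟩
    rw [show pvMergeSortedIntervals ((lo, hi) :: rest) = pvMergeGo lo hi rest from rfl,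
      h.2.2 x]
    simp [pvCovers]

theorem remove_exclude_values_from_list_spec : Claim_equal_remove_exclude_values_from_list := by
  intro total ex _
  unfold Spec_remove_exclude_values_from_list remove_exclude_values_from_list
    remove_exclude_values_from_list_alt
  rw [PySem.List.foldl_append_if_eq_filter, List.nil_append]
  apply List.filter_congr
  intro v _
  have hsort : (PySem.List.sorted (ex.map (fun t => (min t.1 t.2, max t.1 t.2)))
      (fun t : Int × Int => t.1) false).Pairwise (fun a b => a.1 ≤ b.1) :=
    PySem.List.sorted_pairwise _ _
  have hm := pvMerge_props _ hsort
  have hiff : pvIsInExcludeTuples ex v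
      = pvCovered (pvMergeSortedIntervals (PySem.List.sorted
          (ex.map (fun t => (min t.1 t.2, max t.1 t.2))) (fun t => t.1) false)) v := by
    rw [Bool.eq_iff_iff, pvIsIn_iff, pvCovered_iff _ _ hm.1, hm.2 v]
    unfold pvCovers
    constructor
    · rintro ⟨p, hp, h⟩
      exact ⟨p, (PySem.List.mem_sorted _ _ _ _).2 hp, h⟩
    · rintro ⟨p, hp, h⟩
      exact ⟨p, (PySem.List.mem_sorted _ _ _ _).1 hp, h⟩
  rw [hiff]
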